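-- pv_equiv track=rewrite | github.com/k0rd/bakerrrr | game/property_keys.py | property_key_id_for
-- ===== SOURCE A (Python) =====
-- def _text(value):
--     return str(value or "").strip()
--
-- def property_key_id_for(property_id=None, metadata=None, key_id=None):
--     source = _text(key_id)
--     data = metadata if isinstance(metadata, dict) else {}
--     if not source:
--         for field in ("property_key_id", "vehicle_id", "building_id"):
--             source = _text(data.get(field))
--             if source:
--                 break
--     if not source:
--         source = _text(property_id)
--     if not source:
--         return ""
--     if source.startswith("key:"):
--         return source
--     return f"key:{source}"
-- ===== SOURCE B (Python) =====
-- def _norm(value):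
--     return str(value or "").strip()
--
-- def property_key_id_for(property_id=None, metadata=None, key_id=None):
--     get = metadata.get if isinstance(metadata, dict) else (lambda k: None)
--     # lowest priority first; each non-empty later candidate overwrites the accumulator
--     source = _norm(property_id)
--     for raw in (get("building_id"), get("vehicle_id"), get("property_key_id"), key_id):
--         text = _norm(raw)
--         if text:
--             source = text
--     if not source:
--         return ""
--     return "key:" + source.removeprefix("key:")
-- ===== Notes on version B (the rewrite author's own statement) =====
-- stated objective: alternative
-- what changed: Instead of A's early-stop priority chain (first non-empty of key_id, three metadata fields, property_id), B scans the candidates in REVERSE priority with an overwriting accumulator (last non-empty wins, no break/short-circuit) and builds the result as 'key:' + source.removeprefix('key:') instead of a startswith branch.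
import Mathlib
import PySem

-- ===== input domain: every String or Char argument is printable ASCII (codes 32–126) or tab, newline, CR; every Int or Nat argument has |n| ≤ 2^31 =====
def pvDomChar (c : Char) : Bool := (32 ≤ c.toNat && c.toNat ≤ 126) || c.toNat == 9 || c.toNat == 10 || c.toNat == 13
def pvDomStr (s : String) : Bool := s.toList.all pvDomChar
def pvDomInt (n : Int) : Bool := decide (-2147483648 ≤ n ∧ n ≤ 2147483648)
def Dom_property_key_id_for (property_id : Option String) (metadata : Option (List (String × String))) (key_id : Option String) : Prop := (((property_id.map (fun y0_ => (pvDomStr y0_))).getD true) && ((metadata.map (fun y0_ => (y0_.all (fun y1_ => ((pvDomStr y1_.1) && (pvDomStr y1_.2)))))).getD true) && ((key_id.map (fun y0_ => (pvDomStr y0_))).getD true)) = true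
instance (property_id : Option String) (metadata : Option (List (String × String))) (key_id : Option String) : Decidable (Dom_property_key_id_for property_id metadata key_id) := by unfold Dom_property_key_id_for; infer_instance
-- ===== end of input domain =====

-- B replaces A's early-stop priority chain by a reverse-priority overwriting scan and a removeprefix-based prefixing (alternative decomposition, same cost).
-- ===== PORT A =====
-- _text(value) = str(value or "").strip()
def pkTextA (v : Option String) : String := PySem.Str.strip (v.getD "")

-- the for-loop with break over the three metadata fields
def pkScanA (data : List (String × String)) : List String → String
  | [] => ""
  | f :: rest =>
    let s := pkTextA ((PySem.Dict.mk data).get? f)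
    if s = "" then pkScanA data rest else s

def property_key_id_for (property_id : Option String) (metadata : Option (List (String × String))) (key_id : Option String) : String :=
  let source := pkTextA key_id
  let data := metadata.getD []
  let source := if source = "" then pkScanA data ["property_key_id", "vehicle_id", "building_id"] else source
  let source := if source = "" then pkTextA property_id else source
  if source = "" then ""
  else if PySem.Str.startswith source "key:" then source
  else "key:" ++ source

-- ===== PORT B =====
def pkNormB (v : Option String) : String := PySem.Str.strip (v.getD "")

-- the overwriting for-loop: last non-empty candidate wins
def pkOverwriteB (acc : String) : List (Option String) → String
  | [] => acc
  | c :: rest =>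
    let t := pkNormB c
    pkOverwriteB (if t = "" then acc else t) rest

-- source.removeprefix("key:"), ported by hand: drop 4 chars iff the prefix is present (exact for any string)
def pkRemovePrefixB (s : String) : String :=
  if PySem.Str.startswith s "key:" then String.ofList (s.toList.drop 4) else s

def property_key_id_for_alt (property_id : Option String) (metadata : Option (List (String × String))) (key_id : Option String) : String :=
  let get : String → Option String := fun k => (PySem.Dict.mk (metadata.getD [])).get? k
  let source := pkOverwriteB (pkNormB property_id) [get "building_id", get "vehicle_id", get "property_key_id", key_id]
  if source = "" then ""
  else "key:" ++ pkRemovePrefixB source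

-- ===== PRECONDITION & SPEC =====
def Spec_property_key_id_for (property_id : Option String) (metadata : Option (List (String × String))) (key_id : Option String) (out : String) : Prop := out = property_key_id_for_alt property_id metadata key_id
instance (property_id : Option String) (metadata : Option (List (String × String))) (key_id : Option String) (out : String) : Decidable (Spec_property_key_id_for property_id metadata key_id out) := by unfold Spec_property_key_id_for; infer_instance

-- ===== CLAIM =====
def Claim_equal_property_key_id_for : Prop := ∀ (property_id : Option String) (metadata : Option (List (String × String))) (key_id : Option String), Dom_property_key_id_for property_id metadata key_id → Spec_property_key_id_for property_id metadata key_id (property_key_id_for property_id metadata key_id)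

-- ===== LEMMAS AND PROOFS =====
theorem pk_prefix_restore (s : String) (h : PySem.Chars.startswith s.toList ['k','e','y',':'] = true) :
    "key:" ++ String.ofList (s.toList.drop 4) = s := by
  have hpre : ['k','e','y',':'] <+: s.toList := by
    simpa [PySem.Chars.startswith, List.isPrefixOf_iff_prefix] using h
  have h2 := List.prefix_iff_eq_append.mp hpre
  apply String.ext
  simpa using h2

theorem pk_final (s : String) :
    (if s = "" then "" else if PySem.Str.startswith s "key:" then s else "key:" ++ s)
    = (if s = "" then "" else "key:" ++ pkRemovePrefixB s) := by
  by_cases h0 : s = ""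
  · simp [h0]
  · simp only [h0, if_false, pkRemovePrefixB, PySem.Str.startswith]
    have hl : "key:".toList = ['k','e','y',':'] := rfl
    simp only [hl]
    by_cases hp : PySem.Chars.startswith s.toList ['k','e','y',':'] = true
    · rw [if_pos hp, if_pos hp]
      exact (pk_prefix_restore s hp).symm
    · simp [hp]

-- ===== VERDICT =====
theorem property_key_id_for_spec : Claim_equal_property_key_id_for := by
  intro property_id metadata key_id _
  unfold Spec_property_key_id_for property_key_id_for property_key_id_for_alt
  rw [pk_final]
  simp only [pkOverwriteB, pkScanA, pkNormB, pkTextA]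
  split_ifs <;> simp_all
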